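-- pv_equiv track=rewrite | github.com/kyh980909/study-time-check | study_excel_read.py | header_fix
-- ===== SOURCE A (Python) =====
-- def header_fix(header_list):  # header 전처리 함수
--     header1 = []
--     j = 0
--
--     for lst in header_list[0]:
--         if lst is not None:
--             header1.append(lst)
--
--     for index in range(len(header_list[1])):
--         if header_list[1][index] is None:   # header_list[1][index]값이 None이면 header1의 있는 값을 차례로 넣음
--             header_list[1][index] = header1[j]
--             j += 1
--
--     temp = header_list[1]
--     header_list.clear()
--     temp[3] = str(temp[3]).replace('\n', '')  # 한학기 목표시간 개행 문자 변환
--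
--     return temp  # 전처리된 리스트 반환
-- ===== SOURCE B (Python) =====
-- def header_fix(header_list):
--     # recursive merge of the two header rows: walk both rows at once,
--     # skipping None fills in row 0 and building a fresh result list
--     # (no intermediate filtered list, no index arithmetic, no in-place edits of row 1)
--     def merge(row1, row0):
--         if not row1:
--             return []
--         if row1[0] is None:
--             if row0[0] is None:
--                 return merge(row1, row0[1:])
--             return [row0[0]] + merge(row1[1:], row0[1:])
--         return [row1[0]] + merge(row1[1:], row0)
--     temp = merge(header_list[1], header_list[0])
--     header_list.clear()
--     temp[3] = str(temp[3]).replace('\n', '')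
--     return temp
-- ===== Notes on version B (the rewrite author's own statement) =====
-- stated objective: alternative
-- what changed: A runs two imperative passes (collect the non-None entries of row 0 into header1, then index-mutate row 1 in place from it); B is one recursive merge that walks both rows simultaneously, skipping None fills on the fly and building a fresh result list, with no intermediate list, no indices and no in-place edits of row 1.
import Mathlib
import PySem

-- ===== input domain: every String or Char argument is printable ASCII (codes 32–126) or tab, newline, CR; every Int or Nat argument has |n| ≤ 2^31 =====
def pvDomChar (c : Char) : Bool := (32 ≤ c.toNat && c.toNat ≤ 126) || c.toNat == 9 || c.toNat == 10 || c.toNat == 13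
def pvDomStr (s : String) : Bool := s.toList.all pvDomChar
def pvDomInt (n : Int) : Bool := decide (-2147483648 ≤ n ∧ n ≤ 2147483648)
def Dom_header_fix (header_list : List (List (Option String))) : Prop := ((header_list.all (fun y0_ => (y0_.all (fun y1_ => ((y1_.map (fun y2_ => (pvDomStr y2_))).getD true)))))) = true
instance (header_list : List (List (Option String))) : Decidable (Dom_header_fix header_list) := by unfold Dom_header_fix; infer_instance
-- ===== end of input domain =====

-- B replaces A's two imperative passes (filter row 0, index-mutate row 1) by one recursive merge
-- over both rows building a fresh list; A mutates header_list in place (fills row 1, clears the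
-- outer list), B only clears — the equivalence proved is about the return value.

-- ===== PORT A =====
-- one loop iteration of A's fill-by-index loop: state = (current row 1, j)
def aStep (header1 : List (Option String)) (st : List (Option String) × Nat) (idx : Int) : List (Option String) × Nat :=
  match PySem.List.pyGet? st.1 idx with
  | some none => (st.1.set idx.toNat (header1.getD st.2 none), st.2 + 1)
  | _ => st

def header_fix (header_list : List (List (Option String))) : List (Option String) :=
  let row0 := (PySem.List.pyGet? header_list 0).getD []
  let header1 := row0.foldl (fun acc o => if o.isSome then acc ++ [o] else acc) []
  let row1 := (PySem.List.pyGet? header_list 1).getD []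
  let st := (PySem.List.pyRange 0 (row1.length : Int) 1).foldl (aStep header1) (row1, 0)
  let temp := st.1
  let s := match PySem.List.pyGet? temp 3 with
    | some (some s) => s
    | some none => "None"     -- str(None); unreachable under Pre_ (every None is filled)
    | none => ""              -- IndexError; excluded by Pre_
  temp.set 3 (some (PySem.Str.replace s "\n" ""))

-- ===== PORT B =====
-- B's recursive merge of row 1 (to fill) with row 0 (the fills); the `[], _` and `none::_, []`
-- cases are where Python returns [] resp. raises IndexError (the latter excluded by Pre_)
def merge2 : List (Option String) → List (Option String) → List (Option String)
  | [], _ => []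
  | none :: _, [] => []                                  -- Python: IndexError row0[0]; outside Pre_
  | none :: xs, none :: ys => merge2 (none :: xs) ys
  | none :: xs, some v :: ys => some v :: merge2 xs ys
  | some s :: xs, ys => some s :: merge2 xs ys
  termination_by xs ys => (xs.length, ys.length)

def header_fix_alt (header_list : List (List (Option String))) : List (Option String) :=
  let temp := merge2 ((PySem.List.pyGet? header_list 1).getD [])
                     ((PySem.List.pyGet? header_list 0).getD [])
  let s := match PySem.List.pyGet? temp 3 with
    | some (some s) => s
    | some none => "None"
    | none => ""
  temp.set 3 (some (PySem.Str.replace s "\n" ""))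

-- ===== PRECONDITION & SPEC =====
-- A raises IndexError when header_list has < 2 rows, when row 1 has < 4 entries (temp[3] assignment),
-- or when row 1 has more None entries than row 0 has non-None fills (header1[j] out of range).
def Pre_header_fix (header_list : List (List (Option String))) : Prop :=
  2 ≤ header_list.length ∧
  4 ≤ (header_list.getD 1 []).length ∧
  (header_list.getD 1 []).count none ≤ (header_list.getD 0 []).countP (fun o => o.isSome)
instance (header_list : List (List (Option String))) : Decidable (Pre_header_fix header_list) := by unfold Pre_header_fix; infer_instance

def pvWitness_header_fix : List (List (Option String)) :=
  [[some "a", none, some "b"], [none, some "x", none, some "7"]]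

def Spec_header_fix (header_list : List (List (Option String))) (out : List (Option String)) : Prop := out = header_fix_alt header_list
instance (header_list : List (List (Option String))) (out : List (Option String)) : Decidable (Spec_header_fix header_list out) := by unfold Spec_header_fix; infer_instance

-- ===== CLAIM (what is proved, stated in full; the proofs are below) =====
def Claim_equal_header_fix : Prop := ∀ (header_list : List (List (Option String))), Dom_header_fix header_list → Pre_header_fix header_list → Spec_header_fix header_list (header_fix header_list)

-- ===== LEMMAS AND PROOFS =====

-- common reference computation: fill the None slots of xs from the front of h1
def fillRef (h1 : List (Option String)) : List (Option String) → List (Option String)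
  | [] => []
  | none :: xs => h1.headD none :: fillRef h1.tail xs
  | some s :: xs => some s :: fillRef h1 xs

-- A's fill, structurally: index j into the fixed list h1
def fillA (h1 : List (Option String)) : List (Option String) → Nat → List (Option String)
  | [], _ => []
  | none :: xs, j => h1.getD j none :: fillA h1 xs (j+1)
  | some s :: xs, j => some s :: fillA h1 xs j

lemma set_append_length (pre xs : List (Option String)) (x v : Option String) :
    (pre ++ x :: xs).set pre.length v = pre ++ v :: xs := by
  induction pre with
  | nil => rfl
  | cons a t ih => simp [ih]

lemma aloop (h1 : List (Option String)) (cur : List (Option String)) :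
    ∀ (pre : List (Option String)) (j : Nat),
      (PySem.List.pyRange (pre.length : Int) ((pre.length : Int) + (cur.length : Int)) 1).foldl
          (aStep h1) (pre ++ cur, j)
        = (pre ++ fillA h1 cur j, j + cur.count none) := by
  induction cur with
  | nil =>
      intro pre j
      rw [PySem.List.pyRange_one_eq_nil (by simp)]
      simp [fillA]
  | cons x xs ih =>
      intro pre j
      rw [PySem.List.pyRange_one_cons (by simp)]
      simp only [List.foldl_cons]
      have hget : PySem.List.pyGet? (pre ++ x :: xs) (pre.length : Int) = some x :=
        PySem.List.pyGet?_append_length pre xs x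
      cases x with
      | none =>
          have hstep : aStep h1 (pre ++ none :: xs, j) (pre.length : Int)
              = ((pre ++ [h1.getD j none]) ++ xs, j + 1) := by
            simp only [aStep, hget, Int.toNat_natCast]
            rw [set_append_length]
            simp
          rw [hstep]
          have := ih (pre ++ [h1.getD j none]) (j + 1)
          have hlen : (((pre ++ [h1.getD j none]).length : Int)) = (pre.length : Int) + 1 := by
            simp
          rw [hlen] at this
          have harg : ((pre.length : Int) + ((none :: xs : List (Option String)).length : Int))
              = (pre.length : Int) + 1 + (xs.length : Int) := by
            simp; ring
          rw [harg, this]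
          simp [fillA]
          omega
      | some s =>
          have hstep : aStep h1 (pre ++ some s :: xs, j) (pre.length : Int)
              = ((pre ++ [some s]) ++ xs, j) := by
            simp [aStep]
          rw [hstep]
          have := ih (pre ++ [some s]) j
          have hlen : (((pre ++ [some s]).length : Int)) = (pre.length : Int) + 1 := by
            simp
          rw [hlen] at this
          have harg : ((pre.length : Int) + ((some s :: xs : List (Option String)).length : Int))
              = (pre.length : Int) + 1 + (xs.length : Int) := by
            simp; ring
          rw [harg, this]
          simp [fillA]

lemma fillA_eq_fillRef (h1 : List (Option String)) :
    ∀ (xs : List (Option String)) (j : Nat), fillA h1 xs j = fillRef (h1.drop j) xs := by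
  intro xs
  induction xs with
  | nil => intro j; rfl
  | cons x xs ih =>
      intro j
      cases x with
      | none =>
          have hh : h1.getD j none = (h1.drop j).headD none := by
            rw [List.getD_eq_getElem?_getD]
            cases hdj : h1.drop j with
            | nil =>
                have : h1.length ≤ j := by
                  by_contra h
                  have := congrArg List.length hdj
                  simp at this; omega
                simp [List.getElem?_eq_none this]
            | cons y ys =>
                have : h1[j]? = some y := by
                  have := congrArg List.head? hdj
                  simpa [List.head?_drop] using this
                simp [this]
          have ht : h1.drop (j+1) = (h1.drop j).tail := by
            rw [List.tail_drop]
          simp only [fillA, fillRef, ih (j+1), hh, ht]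
      | some s => simp [fillA, fillRef, ih j]

lemma merge2_eq_fillRef :
    ∀ (xs ys : List (Option String)),
      xs.count none ≤ (ys.filter (fun o => o.isSome)).length →
      merge2 xs ys = fillRef (ys.filter (fun o => o.isSome)) xs := by
  intro xs ys
  fun_induction merge2 xs ys with
  | case1 ys => intro _; rfl
  | case2 xs =>
      intro h
      simp at h
  | case3 xs ys ih =>
      intro h
      have h' : ((none : Option String) :: xs).count none
          ≤ (ys.filter (fun o => o.isSome)).length := by
        simpa using h
      rw [ih h']
      simp
  | case4 xs v ys ih =>
      intro h
      have h' : xs.count none ≤ (ys.filter (fun o => o.isSome)).length := by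
        simp at h ⊢
        omega
      rw [ih h']
      simp [fillRef]
  | case5 s xs ys ih =>
      intro h
      have h' : xs.count none ≤ (ys.filter (fun o => o.isSome)).length := by
        simp at h ⊢
        omega
      rw [ih h']
      simp [fillRef]

lemma temps_eq (row0 row1 : List (Option String))
    (hcnt : row1.count none ≤ row0.countP (fun o => o.isSome)) :
    ((PySem.List.pyRange 0 (row1.length : Int) 1).foldl
        (aStep (row0.foldl (fun acc o => if o.isSome then acc ++ [o] else acc) [])) (row1, 0)).1
      = merge2 row1 row0 := by
  have h1 : row0.foldl (fun acc o => if o.isSome then acc ++ [o] else acc) []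
      = row0.filter (fun o => o.isSome) := by
    simpa using PySem.List.foldl_append_if_eq_filter (fun o => o.isSome) (l := row0) (acc := [])
  have hA := aloop (row0.filter (fun o => o.isSome)) row1 [] 0
  simp only [List.length_nil, Nat.cast_zero, List.nil_append, zero_add] at hA
  have hB := merge2_eq_fillRef row1 row0
      (by simpa [List.countP_eq_length_filter] using hcnt)
  rw [h1, hA, hB]
  simp [fillA_eq_fillRef, List.drop_zero]

-- ===== VERDICT (by name: the statement is the Claim_ definition above) =====
theorem header_fix_spec : Claim_equal_header_fix := by
  intro hl _ hpre
  obtain ⟨hlen, _, hcnt⟩ := hpre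
  match hl, hlen with
  | a :: b :: t, _ =>
    show header_fix (a :: b :: t) = header_fix_alt (a :: b :: t)
    have hget0 : PySem.List.pyGet? (a :: b :: t) 0 = some a :=
      PySem.List.pyGet?_zero_cons a (b :: t)
    have hget1 : PySem.List.pyGet? (a :: b :: t) 1 = some b := by
      have h1 : ((1:Nat):Int) = (1:Int) := by norm_num
      rw [← h1, PySem.List.pyGet?_natCast]
      simp
    have hcnt' : b.count none ≤ a.countP (fun o => o.isSome) := by
      simpa [List.getD] using hcnt
    simp only [header_fix, header_fix_alt, hget0, hget1, Option.getD_some]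
    rw [temps_eq a b hcnt']
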